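-- pv_equiv track=rewrite | github.com/HandsomeFLYing/AiPyKociembaTwoArms | RuCuRo-VSCode/cube_3d_rubiks.py | get_face_positions
-- ===== SOURCE A (Python) =====
-- def get_face_positions(face):
--     """获取一个面的9个方块位置"""
--     positions = []
--
--     if face == 'U':  # 上面 (y=2)
--         for x in range(3):
--             for z in range(3):
--                 positions.append( (x, 2, z) )
--     elif face == 'D':  # 下面 (y=0)
--         for x in range(3):
--             for z in range(3):
--                 positions.append( (x, 0, z) )
--     elif face == 'F':  # 前面 (z=2)
--         for x in range(3):
--             for y in range(3):
--                 positions.append( (x, y, 2) )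
--     elif face == 'B':  # 后面 (z=0)
--         for x in range(3):
--             for y in range(3):
--                 positions.append( (x, y, 0) )
--     elif face == 'L':  # 左面 (x=0)
--         for y in range(3):
--             for z in range(3):
--                 positions.append( (0, y, z) )
--     elif face == 'R':  # 右面 (x=2)
--         for y in range(3):
--             for z in range(3):
--                 positions.append( (2, y, z) )
--
--     return positions
-- ===== SOURCE B (Python) =====
-- # Loop-free: each face maps directly to its precomputed literal list of 9
-- # coordinates; the body is a single dict lookup (unknown faces -> []).
-- _FACE_POSITIONS = {
--     'U': [(0, 2, 0), (0, 2, 1), (0, 2, 2), (1, 2, 0), (1, 2, 1), (1, 2, 2), (2, 2, 0), (2, 2, 1), (2, 2, 2)],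
--     'D': [(0, 0, 0), (0, 0, 1), (0, 0, 2), (1, 0, 0), (1, 0, 1), (1, 0, 2), (2, 0, 0), (2, 0, 1), (2, 0, 2)],
--     'F': [(0, 0, 2), (0, 1, 2), (0, 2, 2), (1, 0, 2), (1, 1, 2), (1, 2, 2), (2, 0, 2), (2, 1, 2), (2, 2, 2)],
--     'B': [(0, 0, 0), (0, 1, 0), (0, 2, 0), (1, 0, 0), (1, 1, 0), (1, 2, 0), (2, 0, 0), (2, 1, 0), (2, 2, 0)],
--     'L': [(0, 0, 0), (0, 0, 1), (0, 0, 2), (0, 1, 0), (0, 1, 1), (0, 1, 2), (0, 2, 0), (0, 2, 1), (0, 2, 2)],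
--     'R': [(2, 0, 0), (2, 0, 1), (2, 0, 2), (2, 1, 0), (2, 1, 1), (2, 1, 2), (2, 2, 0), (2, 2, 1), (2, 2, 2)],
-- }
--
-- def get_face_positions(face):
--     return list(_FACE_POSITIONS.get(face, []))
-- ===== Notes on version B (the rewrite author's own statement) =====
-- stated objective: simpler
-- what changed: Replaced the six-branch if/elif chain of nested enumeration loops by a loop-free precomputed constant table mapping each face letter to its literal list of nine coordinates; the body is a single dict lookup with [] as default.
import Mathlib
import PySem

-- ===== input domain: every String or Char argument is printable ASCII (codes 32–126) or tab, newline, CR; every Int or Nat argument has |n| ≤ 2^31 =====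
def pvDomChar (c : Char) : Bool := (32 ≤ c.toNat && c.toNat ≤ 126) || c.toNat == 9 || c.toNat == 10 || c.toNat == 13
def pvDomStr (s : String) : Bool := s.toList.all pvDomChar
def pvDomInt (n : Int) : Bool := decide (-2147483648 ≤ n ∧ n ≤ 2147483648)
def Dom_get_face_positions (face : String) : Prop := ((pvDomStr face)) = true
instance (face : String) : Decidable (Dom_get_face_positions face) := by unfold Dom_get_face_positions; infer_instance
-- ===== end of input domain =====

-- B replaces A's six branches of nested enumeration loops by a loop-free
-- precomputed literal table consulted with one dict lookup (objective: simpler).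

-- ===== PORT A =====
def get_face_positions (face : String) : List (Int × Int × Int) :=
  if face = "U" then
    (PySem.List.pyRange 0 3 1).foldl (fun acc x =>
      (PySem.List.pyRange 0 3 1).foldl (fun acc z => acc ++ [(x, 2, z)]) acc) []
  else if face = "D" then
    (PySem.List.pyRange 0 3 1).foldl (fun acc x =>
      (PySem.List.pyRange 0 3 1).foldl (fun acc z => acc ++ [(x, 0, z)]) acc) []
  else if face = "F" then
    (PySem.List.pyRange 0 3 1).foldl (fun acc x =>
      (PySem.List.pyRange 0 3 1).foldl (fun acc y => acc ++ [(x, y, 2)]) acc) []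
  else if face = "B" then
    (PySem.List.pyRange 0 3 1).foldl (fun acc x =>
      (PySem.List.pyRange 0 3 1).foldl (fun acc y => acc ++ [(x, y, 0)]) acc) []
  else if face = "L" then
    (PySem.List.pyRange 0 3 1).foldl (fun acc y =>
      (PySem.List.pyRange 0 3 1).foldl (fun acc z => acc ++ [(0, y, z)]) acc) []
  else if face = "R" then
    (PySem.List.pyRange 0 3 1).foldl (fun acc y =>
      (PySem.List.pyRange 0 3 1).foldl (fun acc z => acc ++ [(2, y, z)]) acc) []
  else []

-- ===== PORT B =====
-- the precomputed table: face -> its literal list of nine coordinates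
def pvFacePositions : PySem.Dict String (List (Int × Int × Int)) :=
  PySem.Dict.ofList
    [("U", [(0, 2, 0), (0, 2, 1), (0, 2, 2), (1, 2, 0), (1, 2, 1), (1, 2, 2), (2, 2, 0), (2, 2, 1), (2, 2, 2)]),
     ("D", [(0, 0, 0), (0, 0, 1), (0, 0, 2), (1, 0, 0), (1, 0, 1), (1, 0, 2), (2, 0, 0), (2, 0, 1), (2, 0, 2)]),
     ("F", [(0, 0, 2), (0, 1, 2), (0, 2, 2), (1, 0, 2), (1, 1, 2), (1, 2, 2), (2, 0, 2), (2, 1, 2), (2, 2, 2)]),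
     ("B", [(0, 0, 0), (0, 1, 0), (0, 2, 0), (1, 0, 0), (1, 1, 0), (1, 2, 0), (2, 0, 0), (2, 1, 0), (2, 2, 0)]),
     ("L", [(0, 0, 0), (0, 0, 1), (0, 0, 2), (0, 1, 0), (0, 1, 1), (0, 1, 2), (0, 2, 0), (0, 2, 1), (0, 2, 2)]),
     ("R", [(2, 0, 0), (2, 0, 1), (2, 0, 2), (2, 1, 0), (2, 1, 1), (2, 1, 2), (2, 2, 0), (2, 2, 1), (2, 2, 2)])]

def get_face_positions_alt (face : String) : List (Int × Int × Int) :=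
  pvFacePositions.getD face []

-- ===== PRECONDITION & SPEC =====
def Spec_get_face_positions (face : String) (out : List (Int × Int × Int)) : Prop := out = get_face_positions_alt face
instance (face : String) (out : List (Int × Int × Int)) : Decidable (Spec_get_face_positions face out) := by unfold Spec_get_face_positions; infer_instance

-- ===== CLAIM (what is proved, stated in full; the proofs are below) =====
def Claim_equal_get_face_positions : Prop := ∀ (face : String), Dom_get_face_positions face → Spec_get_face_positions face (get_face_positions face)

-- ===== LEMMAS AND PROOFS =====
theorem pvFacePositions_getD_default (face : String)
    (h1 : face ≠ "U") (h2 : face ≠ "D") (h3 : face ≠ "F")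
    (h4 : face ≠ "B") (h5 : face ≠ "L") (h6 : face ≠ "R") :
    pvFacePositions.getD face [] = [] := by
  have hd : pvFacePositions = PySem.Dict.mk
      [("U", [(0, 2, 0), (0, 2, 1), (0, 2, 2), (1, 2, 0), (1, 2, 1), (1, 2, 2), (2, 2, 0), (2, 2, 1), (2, 2, 2)]),
       ("D", [(0, 0, 0), (0, 0, 1), (0, 0, 2), (1, 0, 0), (1, 0, 1), (1, 0, 2), (2, 0, 0), (2, 0, 1), (2, 0, 2)]),
       ("F", [(0, 0, 2), (0, 1, 2), (0, 2, 2), (1, 0, 2), (1, 1, 2), (1, 2, 2), (2, 0, 2), (2, 1, 2), (2, 2, 2)]),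
       ("B", [(0, 0, 0), (0, 1, 0), (0, 2, 0), (1, 0, 0), (1, 1, 0), (1, 2, 0), (2, 0, 0), (2, 1, 0), (2, 2, 0)]),
       ("L", [(0, 0, 0), (0, 0, 1), (0, 0, 2), (0, 1, 0), (0, 1, 1), (0, 1, 2), (0, 2, 0), (0, 2, 1), (0, 2, 2)]),
       ("R", [(2, 0, 0), (2, 0, 1), (2, 0, 2), (2, 1, 0), (2, 1, 1), (2, 1, 2), (2, 2, 0), (2, 2, 1), (2, 2, 2)])] := by decide
  rw [hd]
  simp [PySem.Dict.getD, PySem.Dict.get?,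
    Ne.symm h1, Ne.symm h2, Ne.symm h3, Ne.symm h4, Ne.symm h5, Ne.symm h6]

-- ===== VERDICT (by name: the statement is the Claim_ definition above) =====
theorem get_face_positions_spec : Claim_equal_get_face_positions := by
  intro face _
  unfold Spec_get_face_positions
  by_cases h1 : face = "U"; · subst h1; decide
  by_cases h2 : face = "D"; · subst h2; decide
  by_cases h3 : face = "F"; · subst h3; decide
  by_cases h4 : face = "B"; · subst h4; decide
  by_cases h5 : face = "L"; · subst h5; decide
  by_cases h6 : face = "R"; · subst h6; decide
  simp [get_face_positions, get_face_positions_alt,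
    pvFacePositions_getD_default face h1 h2 h3 h4 h5 h6, h1, h2, h3, h4, h5, h6]
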